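-- pv_equiv track=rewrite | github.com/jpags4/Adaptive-Running-Coach-Program- | app.py | _merge_projected_future_activities
-- ===== SOURCE A (Python) =====
-- def _activity_source_text(activity: dict) -> str:
--     return " ".join(
--         str(activity.get(key) or "")
--         for key in ("name", "sport", "sport_name", "type", "title", "modality", "source_title")
--     ).strip()
--
-- def _calendar_activity_kind(activity: dict) -> str:
--     raw = _activity_source_text(activity).lower()
--     normalized = "".join(char for char in raw if char.isalpha())
--     if any(token in normalized for token in ("weight", "strength", "lift", "mobility", "stretch", "yoga", "pilates", "core")):
--         return "strength"
--     if "run" in normalized: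
--         return "run"
--     if any(token in normalized for token in ("spin", "cycling", "bike", "peloton", "ride")):
--         return "spin"
--     return normalized or "activity"
--
-- def _merge_projected_future_activities(recorded: list[dict], projected: list[dict]) -> list[dict]:
--     if not recorded:
--         return projected
--     if not projected:
--         return recorded
--
--     has_recorded_run = any(_calendar_activity_kind(item) == "run" for item in recorded)
--     has_recorded_strength = any(_calendar_activity_kind(item) == "strength" for item in recorded)
--
--     merged = list(recorded)
--     for item in projected:
--         kind = _calendar_activity_kind(item)
--         if kind == "run" and not has_recorded_run:
--             merged.append(item)
--             has_recorded_run = True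
--         elif kind == "strength" and not has_recorded_strength:
--             merged.append(item)
--             has_recorded_strength = True
--
--     return merged
-- ===== SOURCE B (Python) =====
-- _KEYS = ("name", "sport", "sport_name", "type", "title", "modality", "source_title")
--
-- _KIND_TABLE = (
--     ("strength", ("weight", "strength", "lift", "mobility", "stretch", "yoga", "pilates", "core")),
--     ("run", ("run",)),
--     ("spin", ("spin", "cycling", "bike", "peloton", "ride")),
-- )
--
-- def _kind(activity):
--     normalized = "".join(
--         char
--         for char in " ".join(str(activity.get(key) or "") for key in _KEYS).strip().lower()
--         if char.isalpha()
--     )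
--     for label, tokens in _KIND_TABLE:
--         if any(token in normalized for token in tokens):
--             return label
--     return normalized or "activity"
--
-- def _merge_projected_future_activities(recorded, projected):
--     if not recorded:
--         return projected
--     if not projected:
--         return recorded
--     have = {_kind(item) for item in recorded}
--     kinds = [_kind(item) for item in projected]
--     picks = sorted(kinds.index(want) for want in ("run", "strength")
--                    if want not in have and want in kinds)
--     return recorded + [projected[i] for i in picks]
-- ===== Notes on version B (the rewrite author's own statement) =====
-- stated objective: alternative
-- what changed: B inverts the loop structure: instead of A's stateful scan over projected with two mutated booleans, B classifies activities with a table-driven token loop, computes the set of recorded kinds and the list of projected kinds once, then loops over the two special CATEGORIES, locating the first projected index of each missing one with list.index and emitting the picked items in sorted positional order.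
import Mathlib
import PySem

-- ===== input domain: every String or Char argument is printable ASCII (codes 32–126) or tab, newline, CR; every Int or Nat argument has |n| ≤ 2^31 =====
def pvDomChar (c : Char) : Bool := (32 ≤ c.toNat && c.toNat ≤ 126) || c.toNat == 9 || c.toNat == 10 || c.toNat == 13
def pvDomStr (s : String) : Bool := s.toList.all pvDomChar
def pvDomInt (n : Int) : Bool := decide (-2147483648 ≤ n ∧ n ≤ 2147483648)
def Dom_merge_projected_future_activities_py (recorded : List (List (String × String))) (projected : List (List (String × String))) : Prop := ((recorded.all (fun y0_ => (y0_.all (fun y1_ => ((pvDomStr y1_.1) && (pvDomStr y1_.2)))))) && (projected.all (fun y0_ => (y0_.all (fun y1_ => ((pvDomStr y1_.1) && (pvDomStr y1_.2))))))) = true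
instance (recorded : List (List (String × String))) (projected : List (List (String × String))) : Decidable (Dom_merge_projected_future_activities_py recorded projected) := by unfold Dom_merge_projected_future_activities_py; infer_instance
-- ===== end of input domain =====

-- B: inverted loop structure — table-driven kind classification, then a loop over the two special categories locating the first matching projected index of each missing one (list.index + sorted positional emission), instead of A's stateful scan over projected with two mutated boolean flags; same cost, alternative structure.


-- ===== PORT A =====
def pvKeysA : List String := ["name", "sport", "sport_name", "type", "title", "modality", "source_title"]

-- 'str(activity.get(key) or "")': on string values, 'x or ""' maps None and "" to "" and is otherwise x, i.e. getD "" (str() is the identity on str)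
def activity_source_text (activity : List (String × String)) : String :=
  PySem.Str.strip (PySem.Str.join " " (pvKeysA.map (fun key => ((PySem.Dict.mk activity).get? key).getD "")))

-- '"".join(char for char in raw if char.isalpha())' = the filtered char list
def calendar_activity_kind (activity : List (String × String)) : String :=
  let raw := PySem.Str.lower (activity_source_text activity)
  let normalized := String.ofList (raw.toList.filter PySem.Chars.isalpha)
  if ["weight", "strength", "lift", "mobility", "stretch", "yoga", "pilates", "core"].any (fun token => PySem.Str.isIn token normalized) then "strength"
  else if PySem.Str.isIn "run" normalized then "run"
  else if ["spin", "cycling", "bike", "peloton", "ride"].any (fun token => PySem.Str.isIn token normalized) then "spin"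
  else if normalized == "" then "activity" else normalized

-- loop body of A's 'for item in projected' over the state (merged, has_recorded_run, has_recorded_strength)
def mergeStepA (st : List (List (String × String)) × Bool × Bool) (item : List (String × String)) : List (List (String × String)) × Bool × Bool :=
  let kind := calendar_activity_kind item
  if kind == "run" && !st.2.1 then (st.1 ++ [item], true, st.2.2)
  else if kind == "strength" && !st.2.2 then (st.1 ++ [item], st.2.1, true)
  else st

def merge_projected_future_activities_py (recorded : List (List (String × String))) (projected : List (List (String × String))) : List (List (String × String)) :=
  if recorded = [] then projected
  else if projected = [] then recorded
  else
    let has_recorded_run := recorded.any (fun item => calendar_activity_kind item == "run")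
    let has_recorded_strength := recorded.any (fun item => calendar_activity_kind item == "strength")
    (projected.foldl mergeStepA (recorded, has_recorded_run, has_recorded_strength)).1

-- ===== PORT B =====
def pvKeysB : List String := ["name", "sport", "sport_name", "type", "title", "modality", "source_title"]

def pvKindTable : List (String × List String) :=
  [("strength", ["weight", "strength", "lift", "mobility", "stretch", "yoga", "pilates", "core"]),
   ("run", ["run"]),
   ("spin", ["spin", "cycling", "bike", "peloton", "ride"])]

-- Source B's 'for label, tokens in _KIND_TABLE: if any(...): return label' with the fall-through default
def kindLoopB (normalized : String) : List (String × List String) → String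
  | [] => if normalized == "" then "activity" else normalized
  | (label, tokens) :: rest =>
      if tokens.any (fun token => PySem.Str.isIn token normalized) then label else kindLoopB normalized rest

def kindB (activity : List (String × String)) : String :=
  let normalized := String.ofList
    (PySem.Str.lower (PySem.Str.strip (PySem.Str.join " "
      (pvKeysB.map (fun key => ((PySem.Dict.mk activity).get? key).getD "")))) |>.toList.filter PySem.Chars.isalpha)
  kindLoopB normalized pvKindTable

-- Source B's merge: 'kinds.index(want)' runs only under the guard 'want in kinds', where index? is some;
-- likewise 'projected[i]' indexes a known-valid first-occurrence index, so the getD defaults are unreachable.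
def merge_projected_future_activities_py_alt (recorded : List (List (String × String))) (projected : List (List (String × String))) : List (List (String × String)) :=
  if recorded = [] then projected
  else if projected = [] then recorded
  else
    let haveS : PySem.Set String := PySem.Set.ofList (recorded.map kindB)
    let kinds : List String := projected.map kindB
    let picks : List Int := PySem.List.sorted
      ((["run", "strength"].filter (fun w => !(PySem.Set.contains haveS w) && kinds.contains w)).map
        (fun w => (((PySem.List.index? kinds w).getD 0 : Nat) : Int)))
      (fun x => x) false
    recorded ++ picks.map (fun i => PySem.List.pyGetD projected i [])

-- ===== PRECONDITION & SPEC =====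
def Spec_merge_projected_future_activities_py (recorded : List (List (String × String))) (projected : List (List (String × String))) (out : List (List (String × String))) : Prop := out = merge_projected_future_activities_py_alt recorded projected
instance (recorded : List (List (String × String))) (projected : List (List (String × String))) (out : List (List (String × String))) : Decidable (Spec_merge_projected_future_activities_py recorded projected out) := by unfold Spec_merge_projected_future_activities_py; infer_instance

-- ===== CLAIM (what is proved, stated in full; the proofs are below) =====
def Claim_equal_merge_projected_future_activities_py : Prop := ∀ (recorded : List (List (String × String))) (projected : List (List (String × String))), Dom_merge_projected_future_activities_py recorded projected → Spec_merge_projected_future_activities_py recorded projected (merge_projected_future_activities_py recorded projected)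

-- ===== LEMMAS AND PROOFS =====

-- the two kind functions agree: unrolling B's three-row table loop gives A's if-chain
theorem kindB_eq_kindA (activity : List (String × String)) :
    kindB activity = calendar_activity_kind activity := by
  simp only [kindB, calendar_activity_kind, activity_source_text, pvKindTable, kindLoopB,
    pvKeysA, pvKeysB, List.any_cons, List.any_nil, Bool.or_false]

-- what A's projected loop appends, as a recursion over projected with the two flags
def selA : Bool → Bool → List (List (String × String)) → List (List (String × String))
  | _, _, [] => []
  | hr, hs, x :: xs =>
    if kindB x == "run" && !hr then x :: selA true hs xs
    else if kindB x == "strength" && !hs then x :: selA hr true xs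
    else selA hr hs xs

theorem foldA_eq_selA (projected : List (List (String × String))) :
    ∀ (m : List (List (String × String))) (hr hs : Bool),
      (projected.foldl mergeStepA (m, hr, hs)).1 = m ++ selA hr hs projected := by
  induction projected with
  | nil => intro m hr hs; simp [selA]
  | cons x xs ih =>
    intro m hr hs
    simp only [List.foldl_cons, selA]
    by_cases h1 : kindB x = "run" ∧ hr = false
    · have : mergeStepA (m, hr, hs) x = (m ++ [x], true, hs) := by
        simp [mergeStepA, ← kindB_eq_kindA, h1.1, h1.2]
      rw [this, ih]
      simp [h1.1, h1.2, selA]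
    · by_cases h2 : kindB x = "strength" ∧ hs = false
      · have hne : kindB x ≠ "run" := by rw [h2.1]; decide
        have : mergeStepA (m, hr, hs) x = (m ++ [x], hr, true) := by
          simp [mergeStepA, ← kindB_eq_kindA, hne, h2.1, h2.2]
        rw [this, ih]
        have : (kindB x == "run" && !hr) = false := by
          simp [hne]
        simp [this, h2.1, h2.2, selA]
      · have : mergeStepA (m, hr, hs) x = (m, hr, hs) := by
          unfold mergeStepA
          rw [← kindB_eq_kindA]
          rcases Bool.eq_false_or_eq_true hr with hhr | hhr <;>
          rcases Bool.eq_false_or_eq_true hs with hhs | hhs <;>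
            simp_all [not_and] <;> simp_all
        rw [this, ih]
        have e1 : (kindB x == "run" && !hr) = false := by
          rcases Bool.eq_false_or_eq_true hr with hhr | hhr <;> simp_all [not_and]
        have e2 : (kindB x == "strength" && !hs) = false := by
          rcases Bool.eq_false_or_eq_true hs with hhs | hhs <;> simp_all [not_and]
        simp [e1, e2]

-- first occurrence of kind p in projected, located through index? on the mapped kind list
theorem find_first_kind (p : String) (projected : List (List (String × String))) (k : Nat)
    (h : PySem.List.index? (projected.map kindB) p = some k) :
    k < projected.length ∧ kindB (projected.getD k []) = p ∧
      ∀ j, j < k → kindB (projected.getD j []) ≠ p := by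
  induction projected generalizing k with
  | nil => simp [PySem.List.index?_eq_idxOf?, List.idxOf?] at h
  | cons x xs ih =>
    by_cases hx : kindB x = p
    · have : PySem.List.index? (kindB x :: xs.map kindB) p = some 0 := by
        rw [hx]; exact PySem.List.index?_cons_self _ _
      rw [List.map_cons, this] at h
      obtain rfl : (0 : Nat) = k := by simpa using h
      exact ⟨by simp, by simpa using hx, by omega⟩
    · rw [List.map_cons, PySem.List.index?_cons_of_ne _ (by simpa using hx)] at h
      obtain ⟨k', hk', rfl⟩ := Option.map_eq_some_iff.mp h
      obtain ⟨h1, h2, h3⟩ := ih k' hk'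
      refine ⟨by simpa using h1, by simpa using h2, ?_⟩
      intro j hj
      cases j with
      | zero => simpa using hx
      | succ j' => simpa using h3 j' (by omega)

-- unfolding equation for selA on a cons cell
theorem selA_cons (hr hs : Bool) (x : List (String × String)) (xs : List (List (String × String))) :
    selA hr hs (x :: xs) =
      (if kindB x == "run" && !hr then x :: selA true hs xs
       else if kindB x == "strength" && !hs then x :: selA hr true xs
       else selA hr hs xs) := rfl

theorem selA_both_up (projected : List (List (String × String))) :
    selA true true projected = [] := by
  induction projected with
  | nil => rfl
  | cons x xs ih => simp [selA_cons, ih]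

-- selA with only the run flag down returns the first run item (if any)
theorem selA_run_only (projected : List (List (String × String))) :
    selA false true projected =
      match PySem.List.index? (projected.map kindB) "run" with
      | none => []
      | some k => [projected.getD k []] := by
  induction projected with
  | nil => rfl
  | cons x xs ih =>
    by_cases hx : kindB x = "run"
    · rw [List.map_cons, hx, PySem.List.index?_cons_self]
      simp [selA_cons, hx, selA_both_up]
    · have hL : selA false true (x :: xs) = selA false true xs := by simp [selA_cons, hx]
      rw [hL, ih, List.map_cons, PySem.List.index?_cons_of_ne _ (by simpa using hx)]
      cases PySem.List.index? (xs.map kindB) "run" <;> simp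

-- symmetric: only the strength flag down
theorem selA_strength_only (projected : List (List (String × String))) :
    selA true false projected =
      match PySem.List.index? (projected.map kindB) "strength" with
      | none => []
      | some k => [projected.getD k []] := by
  induction projected with
  | nil => rfl
  | cons x xs ih =>
    by_cases hx : kindB x = "strength"
    · rw [List.map_cons, hx, PySem.List.index?_cons_self]
      simp [selA_cons, hx, selA_both_up]
    · have hL : selA true false (x :: xs) = selA true false xs := by simp [selA_cons, hx]
      rw [hL, ih, List.map_cons, PySem.List.index?_cons_of_ne _ (by simpa using hx)]
      cases PySem.List.index? (xs.map kindB) "strength" <;> simp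

-- both flags down: first run and first strength, emitted in positional order
theorem selA_both_down (projected : List (List (String × String))) :
    selA false false projected =
      match PySem.List.index? (projected.map kindB) "run",
            PySem.List.index? (projected.map kindB) "strength" with
      | none, none => []
      | some k, none => [projected.getD k []]
      | none, some k => [projected.getD k []]
      | some kr, some ks =>
          if kr < ks then [projected.getD kr [], projected.getD ks []]
          else [projected.getD ks [], projected.getD kr []] := by
  induction projected with
  | nil => rfl
  | cons x xs ih =>
    by_cases hr : kindB x = "run"
    · have hs : kindB x ≠ "strength" := by rw [hr]; decide
      have hL : selA false false (x :: xs) = x :: selA true false xs := by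
        simp [selA_cons, hr]
      rw [hL, selA_strength_only, List.map_cons, hr, PySem.List.index?_cons_self,
        PySem.List.index?_cons_of_ne _ (by simpa [hr] using hs)]
      cases PySem.List.index? (xs.map kindB) "strength" <;> simp
    · by_cases hs : kindB x = "strength"
      · have hL : selA false false (x :: xs) = x :: selA false true xs := by
          simp [selA_cons, hr, hs]
        rw [hL, selA_run_only, List.map_cons, hs, PySem.List.index?_cons_self,
          PySem.List.index?_cons_of_ne _ (by simpa [hs] using hr)]
        cases PySem.List.index? (xs.map kindB) "run" <;> simp
      · have hL : selA false false (x :: xs) = selA false false xs := by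
          simp [selA_cons, hr, hs]
        rw [hL, ih, List.map_cons,
          PySem.List.index?_cons_of_ne _ (by simpa using hr),
          PySem.List.index?_cons_of_ne _ (by simpa using hs)]
        cases PySem.List.index? (xs.map kindB) "run" <;>
          cases PySem.List.index? (xs.map kindB) "strength" <;>
          simp [Nat.succ_lt_succ_iff]

theorem sorted_nil_int :
    PySem.List.sorted ([] : List Int) (fun x => x) false = [] :=
  PySem.List.sorted_eq_self_of_pairwise _ _ List.Pairwise.nil

-- sorted of a two-element Int list
theorem sorted_pair (a b : Int) :
    PySem.List.sorted [a, b] (fun x => x) false = if a ≤ b then [a, b] else [b, a] := by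
  by_cases h : a ≤ b
  · rw [if_pos h]
    exact PySem.List.sorted_id_eq_of_perm_of_pairwise _ _ (List.Perm.refl _) (by simp [h])
  · rw [if_neg h]
    exact PySem.List.sorted_id_eq_of_perm_of_pairwise _ _ (List.Perm.swap _ _ _) (by simp; omega)

theorem sorted_single (a : Int) :
    PySem.List.sorted [a] (fun x => x) false = [a] :=
  PySem.List.sorted_id_eq_of_perm_of_pairwise _ _ (List.Perm.refl _) (by simp)

-- A's 'any(kind == k)' over recorded equals B's membership in the set of recorded kinds
theorem any_eq_contains_ofList (recorded : List (List (String × String))) (k : String) :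
    (recorded.any (fun item => calendar_activity_kind item == k))
      = PySem.Set.contains (PySem.Set.ofList (recorded.map kindB)) k := by
  by_cases h : ∃ item ∈ recorded, calendar_activity_kind item = k
  · obtain ⟨item, hmem, hk⟩ := h
    have h1 : recorded.any (fun item => calendar_activity_kind item == k) = true := by
      simp only [List.any_eq_true]; exact ⟨item, hmem, by simp [hk]⟩
    have h2 : k ∈ PySem.Set.ofList (recorded.map kindB) := by
      rw [PySem.Set.mem_ofList]
      exact List.mem_map.2 ⟨item, hmem, by rw [kindB_eq_kindA, hk]⟩
    rw [h1, (PySem.Set.contains_iff _ _).2 h2]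
  · have h1 : recorded.any (fun item => calendar_activity_kind item == k) = false := by
      simp only [List.any_eq_false]
      intro item hmem
      simpa using fun hk => h ⟨item, hmem, hk⟩
    have h2 : PySem.Set.contains (PySem.Set.ofList (recorded.map kindB)) k = false := by
      rw [Bool.eq_false_iff]
      intro hc
      have := (PySem.Set.contains_iff _ _).1 hc
      rw [PySem.Set.mem_ofList] at this
      obtain ⟨item, hmem, hk⟩ := List.mem_map.1 this
      exact h ⟨item, hmem, by rw [← kindB_eq_kindA, hk]⟩
    rw [h1, h2]

-- membership in a list, phrased through the first-index search that B performs
theorem contains_eq_isSome_index? (xs : List String) (v : String) :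
    xs.contains v = (PySem.List.index? xs v).isSome := by
  cases h : PySem.List.index? xs v with
  | none => simp [List.contains_eq_mem, (PySem.List.index?_eq_none_iff _ _).mp h]
  | some k =>
    simp [List.contains_eq_mem]
    exact (PySem.List.index?_isSome_iff _ _).mp (by rw [h]; rfl)

-- ===== VERDICT (by name: the statement is the Claim_ definition above) =====
theorem merge_projected_future_activities_py_spec : Claim_equal_merge_projected_future_activities_py := by
  intro recorded projected _
  unfold Spec_merge_projected_future_activities_py
  unfold merge_projected_future_activities_py merge_projected_future_activities_py_alt
  by_cases hrec : recorded = []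
  · simp [hrec]
  · by_cases hproj : projected = []
    · simp [hrec, hproj]
    · simp only [hrec, hproj, if_false]
      rw [foldA_eq_selA,
        any_eq_contains_ofList recorded "run", any_eq_contains_ofList recorded "strength"]
      congr 1
      cases hhr : ((PySem.Set.ofList (recorded.map kindB)).contains "run") <;>
        cases hhs : ((PySem.Set.ofList (recorded.map kindB)).contains "strength") <;>
        rcases hR : PySem.List.index? (projected.map kindB) "run" with _ | kr <;>
        rcases hS : PySem.List.index? (projected.map kindB) "strength" with _ | ks <;>
        try simp only [selA_both_up, selA_run_only, selA_strength_only, selA_both_down,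
          contains_eq_isSome_index?, hR, hS, Option.isSome_none, Option.isSome_some,
          Bool.not_false, Bool.not_true, Bool.and_false, Bool.and_true, Bool.false_and,
          Bool.true_and, List.filter_cons, List.filter_nil, List.map_cons, List.map_nil,
          Option.getD_some, sorted_nil_int, sorted_single, if_true, if_false, hhr, hhs,
          reduceIte, Bool.and_self, eq_self_iff_true, Bool.false_eq_true, Bool.true_eq_false,
          PySem.List.pyGetD_natCast, List.getD_eq_getElem?_getD]
      -- remaining: both recorded kinds absent, both present in projected
      have hkr := find_first_kind "run" projected kr hR
      have hks := find_first_kind "strength" projected ks hS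
      have hne : kr ≠ ks := by
        intro h
        rw [h, hks.2.1] at hkr
        exact absurd hkr.2.1 (by decide)
      rw [sorted_pair]
      by_cases hlt : kr < ks
      · rw [if_pos hlt, if_pos (by exact_mod_cast Nat.le_of_lt hlt)]
        simp [PySem.List.pyGetD_natCast, List.getD_eq_getElem?_getD]
      · rw [if_neg hlt, if_neg (by
          intro h
          exact hlt (lt_of_le_of_ne (by exact_mod_cast h) hne))]
        simp [PySem.List.pyGetD_natCast, List.getD_eq_getElem?_getD]
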